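-- pv_equiv track=rewrite | github.com/p09323028/109-1_PBC_Homework | HW6/HW6_3.py | company_name
-- ===== SOURCE A (Python) =====
-- def company_name(title, company):
--     result = []
--     count = []
--     # 計算各公司名稱出現於標題的次數
--     for i in range(len(company)):
--         count.append(title.count(company[i]))
--     # 若次數皆為0，則此筆為NO_MATCH
--     if count == [0] * len(company):
--         return "NO_MATCH"
--     else:
--         while count != [0] * len(company):
--             max = -100
--             max_index = -10
--             # 尋找次數最多的關鍵字
--             for i in range(len(count)):
--                 if count[i] > max:
--                     max = count[i]
--                     max_index = i
--             # 找到後，將其儲存至result，並把其次數歸零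
--             if count[max_index] != 0:
--                 result.append(company[max_index])
--             count[max_index] = 0
--         return ",".join(result)
-- ===== SOURCE B (Python) =====
-- def company_name(title, company):
--     counts = [title.count(c) for c in company]
--     out = []
--     for v in sorted(set(k for k in counts if k > 0), reverse=True):
--         for name, k in zip(company, counts):
--             if k == v:
--                 out.append(name)
--     if not out:
--         return "NO_MATCH"
--     return ",".join(out)
-- ===== Notes on version B (the rewrite author's own statement) =====
-- stated objective: faster
-- what changed: A repeatedly rescans the whole count array to extract the current maximum (selection-sort style, one full scan per emitted company); B computes the distinct positive counts once, sorts them descending, and emits each value's companies in one pass over the list per distinct value (bucket style).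
import Mathlib
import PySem

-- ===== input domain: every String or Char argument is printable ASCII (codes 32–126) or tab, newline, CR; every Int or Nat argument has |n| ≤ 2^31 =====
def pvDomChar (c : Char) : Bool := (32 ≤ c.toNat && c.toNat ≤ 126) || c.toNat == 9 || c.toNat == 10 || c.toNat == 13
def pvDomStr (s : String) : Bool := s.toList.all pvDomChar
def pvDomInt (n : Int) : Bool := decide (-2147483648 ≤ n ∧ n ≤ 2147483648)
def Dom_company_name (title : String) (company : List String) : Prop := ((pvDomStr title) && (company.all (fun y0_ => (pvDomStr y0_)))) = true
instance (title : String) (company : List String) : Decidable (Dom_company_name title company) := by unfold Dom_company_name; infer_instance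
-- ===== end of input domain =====

-- B replaces A's repeated full max-scan selection loop (one scan per emitted company) by one
-- pass over the company list per distinct positive count value, visiting those values in
-- descending order (bucket style); objective: faster (measured on the generated inputs).

-- ===== PORT A =====
-- Python list assignment `xs[i] = v`; exact for in-range i (A only ever assigns at an in-range index)
def pySetIdx (xs : List Int) (i : Int) (v : Int) : List Int :=
  if 0 ≤ i then xs.set i.toNat v else xs.set (xs.length + i).toNat v

-- the inner `for i in range(len(count))` max-scan, state (max, max_index)
def findMax (count : List Int) : Int × Int :=
  (PySem.List.pyRange 0 count.length).foldl
    (fun p i => if PySem.List.pyGetD count i 0 > p.1 then (PySem.List.pyGetD count i 0, i) else p)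
    (-100, -10)

-- the `while count != [0]*len(company)` loop; fuel = length+1 bounds its iterations
-- (each pass zeroes one nonzero entry, so at most length passes run before the condition fails)
def companyLoop (company : List String) : Nat → List Int → List String → List String
  | 0, _, result => result
  | fuel+1, count, result =>
    if count = List.replicate company.length 0 then result
    else
      let mi := (findMax count).2
      let result' := if PySem.List.pyGetD count mi 0 ≠ 0
                     then result ++ [PySem.List.pyGetD company mi ""] else result
      companyLoop company fuel (pySetIdx count mi 0) result'

def company_name (title : String) (company : List String) : String :=
  let count := (PySem.List.pyRange 0 company.length).foldl
      (fun acc i => acc ++ [(PySem.Str.count title (PySem.List.pyGetD company i "") : Int)]) []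
  if count = List.replicate company.length 0 then "NO_MATCH"
  else PySem.Str.join "," (companyLoop company (company.length + 1) count [])

-- ===== PORT B =====
def company_name_alt (title : String) (company : List String) : String :=
  let counts := company.map (fun c => (PySem.Str.count title c : Int))
  let out := (PySem.List.sorted (PySem.Set.ofList (counts.filter (fun k => 0 < k))) (fun v => v) true).foldl
      (fun out v => (company.zip counts).foldl
        (fun out p => if p.2 == v then out ++ [p.1] else out) out) []
  if out = [] then "NO_MATCH" else PySem.Str.join "," out

-- ===== PRECONDITION & SPEC =====
def Spec_company_name (title : String) (company : List String) (out : String) : Prop := out = company_name_alt title company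
instance (title : String) (company : List String) (out : String) : Decidable (Spec_company_name title company out) := by unfold Spec_company_name; infer_instance

-- ===== CLAIM (what is proved, stated in full; the proofs are below) =====
def Claim_equal_company_name : Prop := ∀ (title : String) (company : List String), Dom_company_name title company → Spec_company_name title company (company_name title company)

-- ===== LEMMAS AND PROOFS =====

theorem pv_idxOf_eq (l : List Int) (x : Int) (j : Nat) (hj : j < l.length)
    (hx : l[j] = x) (hb : ∀ i (hi : i < j), l[i]'(by omega) ≠ x) : l.idxOf x = j := by
  induction l generalizing j with
  | nil => simp at hj
  | cons a t ih =>
    cases j with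
    | zero =>
      simp at hx
      simp [hx]
    | succ j =>
      have ha : a ≠ x := hb 0 (Nat.succ_pos j)
      have hba : (a == x) = false := by simp [ha]
      rw [List.idxOf_cons, hba]
      simp only [cond_false]
      have := ih j (by simpa using hj) (by simpa using hx)
        (fun i hi => by simpa using hb (i+1) (by omega))
      omega

theorem pv_findMax_inv (counts : List Int) (hnn : ∀ x ∈ counts, 0 ≤ x) :
    ∀ n, n ≤ counts.length → n ≠ 0 →
    ∃ m, (List.range n).foldl
        (fun p k => if counts.getD k 0 > p.1 then (counts.getD k 0, (k : Int)) else p) (-100, -10)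
        = (m, (counts.idxOf m : Int)) ∧ m ∈ counts.take n ∧ ∀ x ∈ counts.take n, x ≤ m := by
  intro n hn hn0
  induction n with
  | zero => exact absurd rfl hn0
  | succ n ih =>
    by_cases h0 : n = 0
    · subst h0
      have hlt : 0 < counts.length := by omega
      have hg : counts.getD 0 0 = counts[0] := List.getD_eq_getElem _ _ hlt
      have hge : (0:Int) ≤ counts[0] := hnn _ (List.getElem_mem hlt)
      refine ⟨counts[0], ?_, ?_, ?_⟩
      · rw [List.range_succ]
        simp only [List.range_zero, List.nil_append, List.foldl_cons, List.foldl_nil, hg]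
        rw [if_pos (by omega)]
        rw [pv_idxOf_eq counts counts[0] 0 hlt rfl (by intro i hi; omega)]
      · rw [List.mem_take_iff_getElem]; exact ⟨0, by omega, rfl⟩
      · intro x hx
        rw [List.mem_take_iff_getElem] at hx
        obtain ⟨i, hi, rfl⟩ := hx
        have : i = 0 := by omega
        subst this; exact le_refl _
    · obtain ⟨m, hfold, hmem, hmax⟩ := ih (by omega) h0
      have hnlt : n < counts.length := by omega
      have hg : counts.getD n 0 = counts[n] := List.getD_eq_getElem _ _ hnlt
      rw [List.range_succ, List.foldl_append, hfold]
      simp only [List.foldl_cons, List.foldl_nil, hg]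
      by_cases hgt : counts[n] > m
      · rw [if_pos hgt]
        refine ⟨counts[n], ?_, ?_, ?_⟩
        · have hidx : counts.idxOf counts[n] = n := by
            apply pv_idxOf_eq counts counts[n] n hnlt rfl
            intro i hi hEq
            have hmem2 : counts[i] ∈ counts.take n := by
              rw [List.mem_take_iff_getElem]; exact ⟨i, by omega, rfl⟩
            have := hmax _ hmem2
            omega
          rw [hidx]
        · rw [List.mem_take_iff_getElem]; exact ⟨n, by omega, rfl⟩
        · intro x hx
          rw [List.mem_take_iff_getElem] at hx
          obtain ⟨i, hi, rfl⟩ := hx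
          by_cases hin : i < n
          · have hmem2 : counts[i] ∈ counts.take n := by
              rw [List.mem_take_iff_getElem]; exact ⟨i, by omega, rfl⟩
            have := hmax _ hmem2; omega
          · have : i = n := by omega
            subst this; exact le_refl _
      · rw [if_neg hgt]
        refine ⟨m, rfl, ?_, ?_⟩
        · rw [List.mem_take_iff_getElem] at hmem ⊢
          obtain ⟨i, hi, rfl⟩ := hmem
          exact ⟨i, by omega, rfl⟩
        · intro x hx
          rw [List.mem_take_iff_getElem] at hx
          obtain ⟨i, hi, rfl⟩ := hx
          by_cases hin : i < n
          · have hmem2 : counts[i] ∈ counts.take n := by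
              rw [List.mem_take_iff_getElem]; exact ⟨i, by omega, rfl⟩
            exact hmax _ hmem2
          · have : i = n := by omega
            subst this; omega

def pvGroup (company : List String) (counts : List Int) (v : Int) : List String :=
  ((company.zip counts).filter (fun p => p.2 == v)).map Prod.fst

theorem pv_set_idxOf_perm (counts : List Int) (m : Int) (hm : m ∈ counts) :
    (counts.set (counts.idxOf m) 0).Perm (0 :: counts.erase m) := by
  induction counts with
  | nil => simp at hm
  | cons a t ih =>
    by_cases ha : a = m
    · subst ha
      simp [List.idxOf_cons, List.erase_cons]
    · have hb : (a == m) = false := by simp [ha]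
      have hmt : m ∈ t := by
        rcases List.mem_cons.mp hm with h | h
        · exact absurd h.symm ha
        · exact h
      rw [List.idxOf_cons, hb]
      simp only [cond_false, List.set_cons_succ, List.erase_cons]
      rw [hb]
      exact ((ih hmt).cons a).trans (List.Perm.swap 0 a _)

theorem pv_countP_set (counts : List Int) (j : Nat) (hj : j < counts.length)
    (hz : counts[j] ≠ 0) :
    (counts.set j 0).countP (fun x => x ≠ 0) < counts.countP (fun x => x ≠ 0) := by
  induction counts generalizing j with
  | nil => simp at hj
  | cons a t ih =>
    cases j with
    | zero =>
      simp only [List.set_cons_zero, List.countP_cons]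
      have h1 : (decide ((0:Int) ≠ 0)) = false := by simp
      have h2 : (decide (a ≠ 0)) = true := by simpa using hz
      simp [h2]
    | succ j =>
      have := ih j (by simpa using hj) (by simpa using hz)
      simp only [List.set_cons_succ, List.countP_cons]
      omega

theorem pv_group_other (company : List String) (counts : List Int) (m v : Int) (j : Nat)
    (hj : j < counts.length) (hjm : counts[j] = m) (hvm : v ≠ m) (hv0 : v ≠ 0) :
    pvGroup company (counts.set j 0) v = pvGroup company counts v := by
  induction counts generalizing company j with
  | nil => simp at hj
  | cons a t ih =>
    cases company with
    | nil => simp [pvGroup]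
    | cons c comp =>
      cases j with
      | zero =>
        simp only [List.getElem_cons_zero] at hjm
        subst hjm
        have h1 : ((0:Int) == v) = false := by simp [Ne.symm hv0]
        have h2 : (a == v) = false := by simp [Ne.symm hvm]
        simp [pvGroup, List.zip_cons_cons, h1, h2]
      | succ j =>
        have := ih comp j (by simpa using hj) (by simpa using hjm)
        simp only [pvGroup, List.set_cons_succ, List.zip_cons_cons, List.filter_cons] at this ⊢
        by_cases hc : (a == v) = true
        · simp [hc] at this ⊢; exact this
        · simp at hc
          have hb : (a == v) = false := by simp [hc]
          simp [hb] at this ⊢; exact this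

theorem pv_group_head (company : List String) (counts : List Int) (m : Int)
    (hlen : counts.length = company.length) (hm : m ∈ counts) (hm0 : m ≠ 0) :
    pvGroup company counts m
      = company.getD (counts.idxOf m) "" :: pvGroup company (counts.set (counts.idxOf m) 0) m := by
  induction counts generalizing company with
  | nil => simp at hm
  | cons a t ih =>
    cases company with
    | nil => simp at hlen
    | cons c comp =>
      by_cases ha : a = m
      · subst ha
        have h1 : (a == a) = true := by simp
        have h0 : ((0:Int) == a) = false := by simp [Ne.symm hm0]
        simp [pvGroup, List.idxOf_cons, List.zip_cons_cons, List.filter_cons, h0]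
      · have hb : (a == m) = false := by simp [ha]
        have hmt : m ∈ t := by
          rcases List.mem_cons.mp hm with h | h
          · exact absurd h.symm ha
          · exact h
        have := ih comp (by simpa using hlen) hmt
        rw [List.idxOf_cons, hb]
        simp only [cond_false, List.set_cons_succ, List.getD_cons_succ]
        simp only [pvGroup, List.zip_cons_cons, List.filter_cons, hb] at this ⊢
        simp only [Bool.false_eq_true, if_false]
        exact this

theorem pv_flatMap_congr {α β : Type} (l : List α) (f g : α → List β)
    (h : ∀ x ∈ l, f x = g x) : l.flatMap f = l.flatMap g := by
  induction l with
  | nil => rfl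
  | cons a t ih => simp only [List.flatMap_cons, h a (List.mem_cons_self), ih (fun x hx => h x (List.mem_cons_of_mem a hx))]

theorem pv_group_nil (company : List String) (counts : List Int) (v : Int)
    (hv : v ∉ counts) : pvGroup company counts v = [] := by
  unfold pvGroup
  rw [List.filter_eq_nil_iff.mpr, List.map_nil]
  intro p hp
  have := (List.of_mem_zip hp).2
  simp only [beq_iff_eq]
  intro hEq
  exact hv (hEq ▸ this)

theorem pv_findMax_spec (counts : List Int) (hne : counts ≠ []) (hnn : ∀ x ∈ counts, 0 ≤ x) :
    ∃ m, findMax counts = (m, (counts.idxOf m : Int)) ∧ m ∈ counts ∧ ∀ x ∈ counts, x ≤ m := by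
  obtain ⟨m, h1, h2, h3⟩ := pv_findMax_inv counts hnn counts.length le_rfl
    (by simpa using List.length_pos_iff.mpr hne |>.ne')
  refine ⟨m, ?_, by simpa using h2, fun x hx => h3 x (by simpa using hx)⟩
  unfold findMax
  rw [PySem.List.pyRange_zero_natCast, List.foldl_map]
  simp only [PySem.List.pyGetD_natCast]
  exact h1

theorem pv_mem_set (counts : List Int) (m v : Int) (hm : m ∈ counts) :
    (v ∈ counts.set (counts.idxOf m) 0) ↔ (v = 0 ∨ v ∈ counts.erase m) := by
  rw [(pv_set_idxOf_perm counts m hm).mem_iff]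
  simp

theorem pv_loop_eq (company : List String) (fuel : Nat) :
    ∀ (counts : List Int) (acc : List String) (vs : List Int),
    counts.length = company.length →
    (∀ x ∈ counts, 0 ≤ x) →
    counts.countP (fun x => x ≠ 0) < fuel →
    vs.Pairwise (fun a b => b < a) →
    (∀ v, v ∈ vs ↔ (v ∈ counts ∧ 0 < v)) →
    companyLoop company fuel counts acc = acc ++ vs.flatMap (pvGroup company counts) := by
  induction fuel with
  | zero => intro counts acc vs _ _ hf; omega
  | succ fuel ih =>
    intro counts acc vs hlen hnn hf hpw hmv
    by_cases hz : counts = List.replicate company.length 0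
    · rw [companyLoop, if_pos hz]
      have hvs : vs = [] := by
        cases vs with
        | nil => rfl
        | cons v vs' =>
          have h := (hmv v).mp List.mem_cons_self
          have : v = 0 := by
            have := h.1
            rw [hz] at this
            exact List.eq_of_mem_replicate this
          omega
      rw [hvs]; simp
    · rw [companyLoop, if_neg hz]
      have hne : counts ≠ [] := by
        intro h
        apply hz
        have : company.length = 0 := by rw [← hlen, h]; rfl
        rw [this, h]; rfl
      obtain ⟨m, hFM, hmemc, hmax⟩ := pv_findMax_spec counts hne hnn
      have hm0 : 0 < m := by
        have hex : ∃ x ∈ counts, x ≠ 0 := by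
          by_contra hno
          push_neg at hno
          exact hz (List.eq_replicate_iff.mpr ⟨hlen, fun b hb => hno b hb⟩)
        obtain ⟨x, hx, hx0⟩ := hex
        have := hnn x hx
        have := hmax x hx
        omega
      cases vs with
      | nil =>
        exact absurd ((hmv m).mpr ⟨hmemc, hm0⟩) (List.not_mem_nil)
      | cons v vs' =>
        have hvm : v = m := by
          have hv := (hmv v).mp List.mem_cons_self
          have h1 : v ≤ m := hmax v hv.1
          have hm' : m ∈ v :: vs' := (hmv m).mpr ⟨hmemc, hm0⟩
          rcases List.mem_cons.mp hm' with h | h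
          · omega
          · have := (List.pairwise_cons.mp hpw).1 m h
            omega
        subst hvm
        -- evaluate the body
        set j := counts.idxOf v with hjdef
        have hj : j < counts.length := List.idxOf_lt_length_of_mem hmemc
        have hgetj : counts[j] = v := List.getElem_idxOf hj
        rw [hFM]
        have hgd : PySem.List.pyGetD counts (j : Int) 0 = v := by
          rw [PySem.List.pyGetD_natCast, List.getD_eq_getElem _ _ hj, hgetj]
        have hgdc : PySem.List.pyGetD company (j : Int) "" = company.getD j "" := by
          rw [PySem.List.pyGetD_natCast]
        have hset : pySetIdx counts (j : Int) 0 = counts.set j 0 := by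
          unfold pySetIdx
          rw [if_pos (Int.natCast_nonneg j), Int.toNat_natCast]
        simp only [hgd, hgdc, hset, if_pos (by omega : v ≠ 0)]
        -- state after the iteration
        have hlen' : (counts.set j 0).length = company.length := by
          rw [List.length_set]; exact hlen
        have hnn' : ∀ x ∈ counts.set j 0, 0 ≤ x := by
          intro x hx
          rcases (pv_mem_set counts v x hmemc).mp hx with h | h
          · omega
          · exact hnn x (List.mem_of_mem_erase h)
        have hf' : (counts.set j 0).countP (fun x => x ≠ 0) < fuel := by
          have := pv_countP_set counts j hj (by rw [hgetj]; omega)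
          omega
        by_cases hdup : v ∈ counts.erase v
        · -- v still occurs in the zeroed list: keep it in vs
          have hloop := ih (counts.set j 0) (acc ++ [company.getD j ""]) (v :: vs')
            hlen' hnn' hf' hpw ?_
          · rw [hloop]
            have hG1 := pv_group_head company counts v hlen hmemc (by omega)
            have hG2 : vs'.flatMap (pvGroup company (counts.set j 0))
                = vs'.flatMap (pvGroup company counts) := by
              apply pv_flatMap_congr
              intro x hx
              have hxlt := (List.pairwise_cons.mp hpw).1 x hx
              have hx0 := ((hmv x).mp (List.mem_cons_of_mem v hx)).2
              exact pv_group_other company counts v x j hj hgetj (by omega) (by omega)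
            simp only [List.flatMap_cons, hG2, hG1, ← hjdef]
            simp
          · intro x
            rw [List.mem_cons]
            constructor
            · rintro (rfl | hx)
              · exact ⟨(pv_mem_set counts x x hmemc).mpr (Or.inr hdup), hm0⟩
              · have h := (hmv x).mp (List.mem_cons_of_mem v hx)
                have hxv : x ≠ v := by
                  have := (List.pairwise_cons.mp hpw).1 x hx; omega
                exact ⟨(pv_mem_set counts v x hmemc).mpr
                  (Or.inr ((List.mem_erase_of_ne hxv).mpr h.1)), h.2⟩
            · rintro ⟨hx, hx0⟩
              rcases (pv_mem_set counts v x hmemc).mp hx with h | h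
              · omega
              · by_cases hxv : x = v
                · exact Or.inl hxv
                · exact Or.inr (by
                    have := (hmv x).mpr ⟨List.mem_of_mem_erase h, hx0⟩
                    rcases List.mem_cons.mp this with h' | h'
                    · exact absurd h' hxv
                    · exact h')
        · -- v was the last occurrence: drop it from vs
          have hloop := ih (counts.set j 0) (acc ++ [company.getD j ""]) vs'
            hlen' hnn' hf' (List.pairwise_cons.mp hpw).2 ?_
          · rw [hloop]
            have hG1 := pv_group_head company counts v hlen hmemc (by omega)
            have hnil : pvGroup company (counts.set j 0) v = [] := by
              apply pv_group_nil
              intro hmem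
              rcases (pv_mem_set counts v v hmemc).mp hmem with h | h
              · omega
              · exact hdup h
            have hG2 : vs'.flatMap (pvGroup company (counts.set j 0))
                = vs'.flatMap (pvGroup company counts) := by
              apply pv_flatMap_congr
              intro x hx
              have hxlt := (List.pairwise_cons.mp hpw).1 x hx
              have hx0 := ((hmv x).mp (List.mem_cons_of_mem v hx)).2
              exact pv_group_other company counts v x j hj hgetj (by omega) (by omega)
            simp only [List.flatMap_cons, hG2, hG1, ← hjdef, hnil]
            simp
          · intro x
            constructor
            · intro hx
              have h := (hmv x).mp (List.mem_cons_of_mem v hx)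
              have hxv : x ≠ v := by
                have := (List.pairwise_cons.mp hpw).1 x hx; omega
              exact ⟨(pv_mem_set counts v x hmemc).mpr
                (Or.inr ((List.mem_erase_of_ne hxv).mpr h.1)), h.2⟩
            · rintro ⟨hx, hx0⟩
              rcases (pv_mem_set counts v x hmemc).mp hx with h | h
              · omega
              · have hxv : x ≠ v := by
                  intro hEq; subst hEq; exact hdup h
                have := (hmv x).mpr ⟨List.mem_of_mem_erase h, hx0⟩
                rcases List.mem_cons.mp this with h' | h'
                · exact absurd h' hxv
                · exact h'

theorem pv_count_eq (title : String) (company : List String) :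
    (PySem.List.pyRange 0 company.length).foldl
      (fun acc i => acc ++ [(PySem.Str.count title (PySem.List.pyGetD company i "") : Int)]) []
    = company.map (fun c => (PySem.Str.count title c : Int)) := by
  rw [PySem.List.foldl_append_singleton_eq_map]
  have h := PySem.List.map_pyGetD_pyRange_zero company ""
  calc ([] : List Int) ++ (PySem.List.pyRange 0 company.length).map (fun i => (PySem.Str.count title (PySem.List.pyGetD company i "") : Int))
      = ((PySem.List.pyRange 0 company.length).map (fun j => PySem.List.pyGetD company j "")).map (fun c => (PySem.Str.count title c : Int)) := by
        rw [List.map_map]; rfl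
    _ = company.map (fun c => (PySem.Str.count title c : Int)) := by
        rw [show PySem.List.pyRange 0 (company.length : Int) = PySem.List.pyRange 0 (PySem.List.len company) from rfl, h]

-- ===== VERDICT (by name: the statement is the Claim_ definition above) =====
theorem company_name_spec : Claim_equal_company_name := by
  unfold Claim_equal_company_name Spec_company_name
  intro title company _
  unfold company_name company_name_alt
  rw [pv_count_eq]
  set M := company.map (fun c => (PySem.Str.count title c : Int)) with hM
  simp only [PySem.List.foldl_append_if, PySem.List.foldl_append_eq_flatMap, List.nil_append]
  set vs := PySem.List.sorted (PySem.Set.ofList (M.filter (fun k => 0 < k))) (fun v => v) true with hvs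
  have hMlen : M.length = company.length := by rw [hM, List.length_map]
  have hnn : ∀ x ∈ M, 0 ≤ x := by
    intro x hx
    rw [hM] at hx
    obtain ⟨c, _, rfl⟩ := List.mem_map.mp hx
    exact Int.natCast_nonneg _
  have hmemvs : ∀ v, v ∈ vs ↔ (v ∈ M ∧ 0 < v) := by
    intro v
    rw [hvs, PySem.List.mem_sorted]
    rw [show (v ∈ (PySem.Set.ofList (M.filter (fun k => 0 < k)) : List Int)) ↔ v ∈ M.filter (fun k => 0 < k) from PySem.Set.mem_ofList _ v]
    simp [List.mem_filter]
  have hpw : vs.Pairwise (fun a b => b < a) := by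
    have h1 := PySem.List.sorted_pairwise_rev (α := Int) (PySem.Set.ofList (M.filter (fun k => 0 < k))) (fun v => v)
    have h2 : vs.Nodup :=
      (PySem.List.sorted_perm (α := Int) (PySem.Set.ofList (M.filter (fun k => 0 < k))) (fun v => v) true).nodup_iff.mpr
        (PySem.Set.nodup_ofList _)
    rw [← hvs] at h1
    exact (h1.and h2).imp (fun h => lt_of_le_of_ne h.1 (fun hEq => h.2 (hEq ▸ rfl)))
  by_cases hz : M = List.replicate company.length 0
  · rw [if_pos hz]
    have hvnil : vs = [] := by
      cases hvsc : vs with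
      | nil => rfl
      | cons v vs' =>
        have := (hmemvs v).mp (hvsc ▸ List.mem_cons_self)
        have := List.eq_of_mem_replicate (hz ▸ this.1)
        omega
    rw [hvnil]
    simp
  · rw [if_neg hz]
    have hA := pv_loop_eq company (company.length + 1) M [] vs hMlen hnn
      (by have := List.countP_le_length (p := fun x => decide (x ≠ 0)) (l := M); omega)
      hpw hmemvs
    rw [hA, List.nil_append]
    rw [show (List.flatMap (fun x => List.map Prod.fst (List.filter (fun p => p.2 == x) (company.zip M))) vs) = List.flatMap (pvGroup company M) vs from rfl]
    have hex : ∃ x ∈ M, x ≠ 0 := by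
      by_contra hno
      push_neg at hno
      exact hz (List.eq_replicate_iff.mpr ⟨hMlen, fun b hb => hno b hb⟩)
    obtain ⟨x, hx, hx0⟩ := hex
    obtain ⟨i, hi, rfl⟩ := List.mem_iff_getElem.mp hx
    have hic : i < company.length := by omega
    have hout : company[i] ∈ vs.flatMap (pvGroup company M) := by
      apply List.mem_flatMap.mpr
      refine ⟨M[i], (hmemvs M[i]).mpr ⟨hx, by have := hnn M[i] hx; omega⟩, ?_⟩
      unfold pvGroup
      apply List.mem_map.mpr
      refine ⟨(company[i], M[i]), List.mem_filter.mpr ⟨?_, by simp⟩, rfl⟩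
      have hzi : i < (company.zip M).length := by
        rw [List.length_zip]; omega
      have : (company.zip M)[i] = (company[i], M[i]) := List.getElem_zip
      exact this ▸ List.getElem_mem hzi
    rw [if_neg (List.ne_nil_of_mem hout)]
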